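-- pv_equiv track=rewrite | github.com/nknyazeva/course_work | scripts/old_scripts/old_test.py | creation_pairs_genes
-- ===== SOURCE A (Python) =====
-- from itertools import combinations
--
-- number_neighbors = 3
--
-- def creation_pairs_genes(list_genes):
--     list_neighbors = list_genes[:number_neighbors]
--     combinations_neighbors = list(combinations(list_neighbors, 2))
--     for i in range(number_neighbors, len(list_genes)):
--         list_neighbors = list_genes[i - number_neighbors + 1:i]
--         new_neighbors = list_genes[i]
--         for gene in list_neighbors:
--             combinations_neighbors.append((gene, new_neighbors))
--     return combinations_neighbors
-- ===== SOURCE B (Python) =====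
-- number_neighbors = 3
--
-- def creation_pairs_genes(list_genes):
--     result = []
--     for j in range(len(list_genes)):
--         for i in range(max(0, j - number_neighbors + 1), j):
--             result.append((list_genes[i], list_genes[j]))
--     return result
-- ===== Notes on version B (the rewrite author's own statement) =====
-- stated objective: simpler
-- what changed: Replaces A's two-phase structure (itertools.combinations seed on the first window plus a separate append loop over later indices) with one uniform nested index loop emitting, for each j, the pairs (genes[i], genes[j]) for i in the previous number_neighbors-1 positions.
import Mathlib
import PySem

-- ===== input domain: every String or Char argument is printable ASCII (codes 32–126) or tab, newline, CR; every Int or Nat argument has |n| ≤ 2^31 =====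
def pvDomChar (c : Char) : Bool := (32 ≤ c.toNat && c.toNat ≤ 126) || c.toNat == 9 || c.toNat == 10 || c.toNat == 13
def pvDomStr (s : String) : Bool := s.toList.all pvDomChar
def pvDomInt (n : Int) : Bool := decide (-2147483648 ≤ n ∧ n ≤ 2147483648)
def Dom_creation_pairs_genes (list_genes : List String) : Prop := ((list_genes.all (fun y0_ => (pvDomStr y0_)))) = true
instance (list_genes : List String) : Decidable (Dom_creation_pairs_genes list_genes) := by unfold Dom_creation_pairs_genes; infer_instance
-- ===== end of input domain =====

-- B replaces A's two-phase structure (combinations seed on the first window + append loop)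
-- with one uniform nested index loop over a sliding window; objective: simpler. Both total.

-- ===== PORT A =====
-- itertools.combinations(xs, 2), hand-ported (exact: same pair order as CPython's combinations for r=2)
def pyCombinations2 (xs : List String) : List (String × String) :=
  match xs with
  | [] => []
  | x :: rest => rest.map (fun y => (x, y)) ++ pyCombinations2 rest

-- loop body of A's 'for i in range(number_neighbors, len(list_genes))'
-- (list_genes[i] is always in range here, so pyGetD with a dummy default is exact)
def aBody (l : List String) (acc : List (String × String)) (i : Int) : List (String × String) :=
  let list_neighbors := PySem.List.slice l (some (i - 3 + 1)) (some i)
  let new_neighbors := PySem.List.pyGetD l i ""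
  list_neighbors.foldl (fun acc2 gene => acc2 ++ [(gene, new_neighbors)]) acc

def creation_pairs_genes (list_genes : List String) : List (String × String) :=
  let list_neighbors := PySem.List.slice list_genes none (some 3)
  let combinations_neighbors := pyCombinations2 list_neighbors
  (PySem.List.pyRange 3 (list_genes.length : Int) 1).foldl (aBody list_genes) combinations_neighbors

-- ===== PORT B =====
-- loop body of B's 'for j in range(len(list_genes))' (indices i, j always in range: pyGetD exact)
def bBody (l : List String) (acc : List (String × String)) (j : Int) : List (String × String) :=
  (PySem.List.pyRange (max 0 (j - 3 + 1)) j 1).foldl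
    (fun acc2 i => acc2 ++ [(PySem.List.pyGetD l i "", PySem.List.pyGetD l j "")]) acc

def creation_pairs_genes_alt (list_genes : List String) : List (String × String) :=
  (PySem.List.pyRange 0 (list_genes.length : Int) 1).foldl (bBody list_genes) []

-- ===== PRECONDITION & SPEC =====
def Spec_creation_pairs_genes (list_genes : List String) (out : List (String × String)) : Prop := out = creation_pairs_genes_alt list_genes
instance (list_genes : List String) (out : List (String × String)) : Decidable (Spec_creation_pairs_genes list_genes out) := by unfold Spec_creation_pairs_genes; infer_instance

-- ===== CLAIM (what is proved, stated in full; the proofs are below) =====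
def Claim_equal_creation_pairs_genes : Prop := ∀ (list_genes : List String), Dom_creation_pairs_genes list_genes → Spec_creation_pairs_genes list_genes (creation_pairs_genes list_genes)

-- ===== LEMMAS AND PROOFS =====

-- Common structural characterisation: each element paired with the previous two.
def gpairs : String → String → List String → List (String × String)
  | _, _, [] => []
  | x, y, z :: rest => (x, z) :: (y, z) :: gpairs y z rest

def gfull : List String → List (String × String)
  | [] => []
  | [_] => []
  | a :: b :: rest => (a, b) :: gpairs a b rest

lemma pyGetD_mid (p : List String) (x y z : String) (t : List String) :
    PySem.List.pyGetD (p ++ x :: y :: z :: t) ((p.length : Int) + 2) "" = z := by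
  rw [show ((p.length : Int) + 2) = ((p.length + 2 : Nat) : Int) by push_cast; ring,
    PySem.List.pyGetD_natCast]
  simp [List.getD]

lemma slice_mid (p : List String) (x y : String) (t : List String) (i : Int)
    (h : i = (p.length : Int) + 2) :
    PySem.List.slice (p ++ x :: y :: t) (some (i - 3 + 1)) (some i) = [x, y] := by
  subst h
  rw [show (p.length : Int) + 2 - 3 + 1 = ((p.length : Nat) : Int) by ring,
    PySem.List.slice_toNat]
  · rw [show ((p.length : Int) + 2).toNat = p.length + 2 by omega]
    simp
  · positivity
  · positivity

lemma aBody_eval (p : List String) (x y z : String) (t : List String) (acc : List (String × String)) :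
    aBody (p ++ x :: y :: z :: t) acc ((p.length : Int) + 2) = acc ++ [(x, z), (y, z)] := by
  unfold aBody
  rw [pyGetD_mid, slice_mid (t := z :: t) _ _ _ _ rfl]
  simp

lemma bBody_eval (p : List String) (x y z : String) (t : List String) (acc : List (String × String)) :
    bBody (p ++ x :: y :: z :: t) acc ((p.length : Int) + 2) = acc ++ [(x, z), (y, z)] := by
  unfold bBody
  rw [show max 0 ((p.length : Int) + 2 - 3 + 1) = (p.length : Int) by omega, pyGetD_mid,
    PySem.List.pyRange_one_cons (by omega),
    PySem.List.pyRange_one_cons (by omega),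
    PySem.List.pyRange_one_eq_nil (by omega)]
  simp only [List.foldl_cons, List.foldl_nil]
  have h1 : PySem.List.pyGetD (p ++ x :: y :: z :: t) ((p.length : Int)) "" = x := by
    rw [show ((p.length : Int)) = ((p.length : Nat) : Int) by simp, PySem.List.pyGetD_natCast]
    simp [List.getD]
  have h2 : PySem.List.pyGetD (p ++ x :: y :: z :: t) ((p.length : Int) + 1) "" = y := by
    rw [show ((p.length : Int) + 1) = ((p.length + 1 : Nat) : Int) by push_cast; ring,
      PySem.List.pyGetD_natCast]
    simp [List.getD]
  rw [h1, h2]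
  simp

-- generic loop invariant: a fold whose body emits the two window pairs computes gpairs
lemma loop_gpairs (f : List String → List (String × String) → Int → List (String × String))
    (hf : ∀ p x y z t acc, f (p ++ x :: y :: z :: t) acc ((p.length : Int) + 2) = acc ++ [(x, z), (y, z)]) :
    ∀ (zs p : List String) (x y : String) (l : List String) (acc : List (String × String)),
      l = p ++ x :: y :: zs →
      (PySem.List.pyRange ((p.length : Int) + 2) ((p.length : Int) + 2 + zs.length) 1).foldl (f l) acc
        = acc ++ gpairs x y zs := by
  intro zs
  induction zs with
  | nil =>
    intro p x y l acc hl
    rw [PySem.List.pyRange_one_eq_nil (by simp)]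
    simp [gpairs]
  | cons z t ih =>
    intro p x y l acc hl
    rw [PySem.List.pyRange_one_cons (by push_cast [List.length_cons]; omega)]
    simp only [List.foldl_cons]
    rw [hl, hf]
    have hl' : p ++ x :: y :: z :: t = (p ++ [x]) ++ y :: z :: t := by simp
    have hstart : (p.length : Int) + 2 + 1 = (((p ++ [x]).length : Nat) : Int) + 2 := by
      simp; ring
    have hend : (p.length : Int) + 2 + (z :: t).length = (((p ++ [x]).length : Nat) : Int) + 2 + t.length := by
      simp; ring
    rw [hstart, hend, ← hl, ih (p ++ [x]) y z l (acc ++ [(x, z), (y, z)]) (by rw [hl, hl'])]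
    simp [gpairs]

lemma a_eq_gfull (l : List String) : creation_pairs_genes l = gfull l := by
  match l with
  | [] => rfl
  | [a] =>
    show creation_pairs_genes [a] = gfull [a]
    unfold creation_pairs_genes
    rw [PySem.List.pyRange_one_eq_nil (by simp)]
    simp [PySem.List.slice, PySem.List.clampIdx, pyCombinations2, gfull]
  | [a, b] =>
    show creation_pairs_genes [a, b] = gfull [a, b]
    unfold creation_pairs_genes
    rw [PySem.List.pyRange_one_eq_nil (by simp)]
    simp [PySem.List.slice, PySem.List.clampIdx, pyCombinations2, gfull, gpairs]
  | a :: b :: c :: rest =>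
    show creation_pairs_genes (a :: b :: c :: rest) = gfull (a :: b :: c :: rest)
    unfold creation_pairs_genes
    have hsl : PySem.List.slice (a :: b :: c :: rest) none (some 3) = [a, b, c] := by
      simp [PySem.List.slice, PySem.List.clampIdx]
    rw [hsl]
    have h3 : (3 : Int) = (([a] : List String).length : Int) + 2 := by simp
    have hn : ((a :: b :: c :: rest).length : Int) = (([a] : List String).length : Int) + 2 + rest.length := by
      simp; ring
    rw [h3, hn,
      loop_gpairs (aBody) (fun p x y z t acc => aBody_eval p x y z t acc) rest [a] b c
        (a :: b :: c :: rest) _ rfl]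
    simp [pyCombinations2, gfull, gpairs]

lemma b_small_head (a b : String) (rest : List String) :
    (PySem.List.pyRange 0 2 1).foldl (bBody (a :: b :: rest)) [] = [(a, b)] := by
  rw [show PySem.List.pyRange 0 2 1 = [0, 1] by decide]
  simp only [List.foldl_cons, List.foldl_nil]
  unfold bBody
  rw [show max 0 ((0 : Int) - 3 + 1) = (0 : Int) by omega,
    PySem.List.pyRange_one_eq_nil (by omega),
    show max 0 ((1 : Int) - 3 + 1) = (0 : Int) by omega,
    PySem.List.pyRange_one_cons (by omega),
    PySem.List.pyRange_one_eq_nil (by omega)]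
  have h0 : PySem.List.pyGetD (a :: b :: rest) 0 "" = a := by
    rw [show (0 : Int) = ((0 : Nat) : Int) by simp, PySem.List.pyGetD_natCast]
    simp [List.getD]
  have h1 : PySem.List.pyGetD (a :: b :: rest) 1 "" = b := by
    rw [show (1 : Int) = ((1 : Nat) : Int) by simp, PySem.List.pyGetD_natCast]
    simp [List.getD]
  simp [h0, h1]

lemma b_eq_gfull (l : List String) : creation_pairs_genes_alt l = gfull l := by
  match l with
  | [] => rfl
  | [a] =>
    show creation_pairs_genes_alt [a] = gfull [a]
    unfold creation_pairs_genes_alt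
    rw [show ((([a] : List String).length : Nat) : Int) = (1 : Int) by simp,
      show PySem.List.pyRange 0 1 1 = [0] by decide]
    simp only [List.foldl_cons, List.foldl_nil]
    unfold bBody
    rw [show max 0 ((0 : Int) - 3 + 1) = (0 : Int) by omega,
      PySem.List.pyRange_one_eq_nil (by omega)]
    rfl
  | a :: b :: rest =>
    show creation_pairs_genes_alt (a :: b :: rest) = gfull (a :: b :: rest)
    unfold creation_pairs_genes_alt
    have hn : (((a :: b :: rest).length : Nat) : Int) = 2 + (rest.length : Int) := by
      simp; ring
    rw [hn, PySem.List.pyRange_one_append 0 2 (2 + rest.length) (by omega) (by omega),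
      List.foldl_append, b_small_head]
    have h2 : (2 : Int) = ((([] : List String).length : Nat) : Int) + 2 := by simp
    rw [h2,
      loop_gpairs (bBody) (fun p x y z t acc => bBody_eval p x y z t acc) rest [] a b
        (a :: b :: rest) _ rfl]
    simp [gfull]

-- ===== VERDICT (by name: the statement is the Claim_ definition above) =====
theorem creation_pairs_genes_spec : Claim_equal_creation_pairs_genes := by
  intro l _
  unfold Spec_creation_pairs_genes
  rw [a_eq_gfull, b_eq_gfull]
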